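-- pv_equiv track=rewrite | github.com/minjohn/UPenn-CIS-521-Artificial-Intelligence | 7/hw7.py | ngrams
-- ===== SOURCE A (Python) =====
-- def ngrams(n, tokens):
--     ngram_list = []
--     tokens.append("<END>")
--     for i in range(len(tokens)):
--         context = ()
--         for j in reversed(range(n-1)):
--             if i-j > 0:
--                 context+=(tokens[i-j-1],)
--             else:
--                 context+=("<START>",)
--         ngram_list.append((context, tokens[i]))
--     return ngram_list
-- ===== SOURCE B (Python) =====
-- def ngrams(n, tokens):
--     tokens.append("<END>")
--     m = max(n - 1, 0)
--     padded = ["<START>"] * m + tokens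
--     return [(tuple(padded[i:i + m]), tokens[i]) for i in range(len(tokens))]
-- ===== Notes on version B (the rewrite author's own statement) =====
-- stated objective: simpler
-- what changed: B builds the '<START>' padding once as a padded list and takes one slice per position, replacing A's inner reversed-range loop that grows each context element-by-element with tuple +=.
import Mathlib
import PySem

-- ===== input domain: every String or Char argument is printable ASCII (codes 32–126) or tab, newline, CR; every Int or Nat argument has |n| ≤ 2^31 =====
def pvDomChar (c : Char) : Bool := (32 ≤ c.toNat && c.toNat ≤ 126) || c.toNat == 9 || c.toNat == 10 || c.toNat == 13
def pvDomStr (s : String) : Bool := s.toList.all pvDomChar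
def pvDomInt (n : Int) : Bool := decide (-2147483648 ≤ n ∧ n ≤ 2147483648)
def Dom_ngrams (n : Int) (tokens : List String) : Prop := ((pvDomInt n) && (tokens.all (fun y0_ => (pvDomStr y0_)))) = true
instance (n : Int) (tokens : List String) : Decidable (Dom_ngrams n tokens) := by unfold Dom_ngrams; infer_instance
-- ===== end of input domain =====

-- B precomputes the '<START>' padding once and takes a slice per position instead of
-- A's inner element-by-element context loop: objective 'simpler'.  A mutates its
-- argument (tokens.append("<END>")); B performs the same mutation; the equivalence
-- proved here is about the return value (ports model the appended list).

-- ===== PORT A =====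
def ngrams (n : Int) (tokens : List String) : List (List String × String) :=
  -- tokens.append("<END>") : the loop runs over the appended list
  let toks := tokens ++ ["<END>"]
  (PySem.List.pyRange 0 toks.length 1).foldl (fun ngram_list i =>
    -- reversed(range(n-1)) = range(n-2, -1, -1)
    let context := (PySem.List.pyRange (n - 2) (-1) (-1)).foldl (fun ctx j =>
      if i - j > 0 then ctx ++ [PySem.List.pyGetD toks (i - j - 1) ""]
      else ctx ++ ["<START>"]) []
    ngram_list ++ [(context, PySem.List.pyGetD toks i "")]) []

-- ===== PORT B =====
def ngrams_alt (n : Int) (tokens : List String) : List (List String × String) :=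
  let toks := tokens ++ ["<END>"]
  let m : Nat := (n - 1).toNat            -- max(n-1, 0)
  let padded := List.replicate m "<START>" ++ toks
  (PySem.List.pyRange 0 toks.length 1).map (fun i =>
    (PySem.List.slice padded (some i) (some (i + (m : Int))), PySem.List.pyGetD toks i ""))

-- ===== PRECONDITION & SPEC =====
def Spec_ngrams (n : Int) (tokens : List String) (out : List (List String × String)) : Prop := out = ngrams_alt n tokens
instance (n : Int) (tokens : List String) (out : List (List String × String)) : Decidable (Spec_ngrams n tokens out) := by unfold Spec_ngrams; infer_instance

-- ===== CLAIM (what is proved, stated in full; the proofs are below) =====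
def Claim_equal_ngrams : Prop := ∀ (n : Int) (tokens : List String), Dom_ngrams n tokens → Spec_ngrams n tokens (ngrams n tokens)

-- ===== LEMMAS AND PROOFS =====

-- A sublist (drop a, take m) read off as a map of indexed lookups
theorem take_drop_eq_map_range {α : Type} (xs : List α) (a m : Nat) (d : α)
    (h : a + m ≤ xs.length) :
    (xs.drop a).take m = (List.range m).map (fun k => xs.getD (a + k) d) := by
  apply List.ext_getElem
  · simp only [List.length_take, List.length_drop, List.length_map, List.length_range]
    omega
  · intro k h1 h2
    have hk : a + k < xs.length := by
      simp only [List.length_map, List.length_range] at h2; omega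
    simp only [List.getElem_take, List.getElem_drop, List.getElem_map, List.getElem_range,
      List.getD_eq_getElem _ _ hk]

-- the context A builds at position i equals the slice B takes, for 0 ≤ i < toks.length
theorem context_eq_slice (n : Int) (toks : List String) (i : Int)
    (hi0 : 0 ≤ i) (hil : i < (toks.length : Int)) :
    (PySem.List.pyRange (n - 2) (-1) (-1)).foldl (fun ctx j =>
      if i - j > 0 then ctx ++ [PySem.List.pyGetD toks (i - j - 1) ""]
      else ctx ++ ["<START>"]) []
    = PySem.List.slice (List.replicate (n - 1).toNat "<START>" ++ toks)
        (some i) (some (i + ((n - 1).toNat : Int))) := by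
  set m : Nat := (n - 1).toNat with hm
  set padded := List.replicate m "<START>" ++ toks with hp
  -- left side: push the if into the appended singleton, then foldl is a map over the countdown range
  have hfun : (fun (ctx : List String) (j : Int) =>
      if i - j > 0 then ctx ++ [PySem.List.pyGetD toks (i - j - 1) ""] else ctx ++ ["<START>"])
      = fun ctx j => ctx ++ [if i - j > 0 then PySem.List.pyGetD toks (i - j - 1) "" else "<START>"] := by
    funext ctx j; split <;> rfl
  rw [hfun, PySem.List.foldl_append_singleton_eq_map, PySem.List.pyRange_neg_one, List.map_map]
  -- right side: a nonnegative slice is drop/take, then a map of lookups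
  rw [PySem.List.slice_toNat _ hi0 (by omega)]
  have hlen : i.toNat + m ≤ padded.length := by
    simp [hp, List.length_append, List.length_replicate]; omega
  have hcnt : (n - 2 - (-1)).toNat = m := by omega
  have htn : (i + (m : Int)).toNat - i.toNat = m := by omega
  rw [hcnt, htn, take_drop_eq_map_range padded i.toNat m "" hlen]
  apply List.map_congr_left
  intro k hk
  simp only [List.mem_range] at hk
  simp only [Function.comp]
  by_cases hc : i - (n - 2 - (k : Int)) > 0
  · rw [if_pos hc]
    have hge : m ≤ i.toNat + k := by omega
    rw [hp, List.getD_append_right _ _ _ _ (by simpa [List.length_replicate] using hge)]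
    rw [PySem.List.pyGetD_eq_getElem toks "" (by omega) (by omega),
        List.getD_eq_getElem _ _ (by simp only [List.length_replicate]; omega)]
    congr 1
    simp only [List.length_replicate]
    omega
  · rw [if_neg hc]
    have hlt : i.toNat + k < m := by omega
    rw [hp, List.getD_append _ _ _ _ (by simpa [List.length_replicate] using hlt),
        List.getD_replicate _ hlt]

-- ===== VERDICT (by name: the statement is the Claim_ definition above) =====
theorem ngrams_spec : Claim_equal_ngrams := by
  intro n tokens _
  unfold Spec_ngrams ngrams ngrams_alt
  rw [PySem.List.foldl_append_singleton_eq_map]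
  simp only [List.nil_append]
  apply List.map_congr_left
  intro i hi
  rw [PySem.List.mem_pyRange_one] at hi
  rw [context_eq_slice n (tokens ++ ["<END>"]) i hi.1 hi.2]
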